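-- pv_equiv track=rewrite | github.com/srhthu/GPU-Calendar-Monitor | next_cluster/main/main_daemon.py | rank_node
-- ===== SOURCE A (Python) =====
-- def rank_node(hostnames):
--     """
--     Rank hosts. Customize for your preferences.
--     """
--     asus_hosts = []
--     dgx_hosts = []
--     other_hosts = []
--     for k in hostnames:
--         if 'asus' in k:
--             asus_hosts.append(k)
--         elif 'dgx' in k:
--             dgx_hosts.append(k)
--         else:
--             other_hosts.append(k)
--
--     return sorted(asus_hosts) + sorted(dgx_hosts) + sorted(other_hosts)
-- ===== SOURCE B (Python) =====
-- def rank_node(hostnames):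
--     """
--     Rank hosts. Customize for your preferences.
--     """
--     def rank(k):
--         if 'asus' in k:
--             return 0
--         if 'dgx' in k:
--             return 1
--         return 2
--
--     ordered = sorted(hostnames)
--     return [k for r in (0, 1, 2) for k in ordered if rank(k) == r]
-- ===== Notes on version B (the rewrite author's own statement) =====
-- stated objective: simpler
-- what changed: B sorts the whole list once and then emits each category by filtering the sorted list, replacing A's three-bucket partition loop followed by three separate sorts.
import Mathlib
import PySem

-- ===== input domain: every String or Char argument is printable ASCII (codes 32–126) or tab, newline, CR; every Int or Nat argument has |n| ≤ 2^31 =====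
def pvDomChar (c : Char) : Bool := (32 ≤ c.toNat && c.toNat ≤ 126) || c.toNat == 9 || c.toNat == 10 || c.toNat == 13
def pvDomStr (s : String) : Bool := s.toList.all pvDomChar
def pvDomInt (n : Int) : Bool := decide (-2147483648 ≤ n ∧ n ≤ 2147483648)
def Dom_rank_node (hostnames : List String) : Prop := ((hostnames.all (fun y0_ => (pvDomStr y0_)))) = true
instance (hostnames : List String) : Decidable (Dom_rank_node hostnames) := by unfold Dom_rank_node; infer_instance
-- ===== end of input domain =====

-- B sorts the list once and emits each category by filtering the sorted list, replacing A's partition loop plus three separate sorts (same behaviour, simpler decomposition).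


-- ===== PORT A =====
def rank_node (hostnames : List String) : List String :=
  let st := hostnames.foldl
    (fun (acc : List String × List String × List String) k =>
      if PySem.Str.isIn "asus" k then (acc.1 ++ [k], acc.2.1, acc.2.2)
      else if PySem.Str.isIn "dgx" k then (acc.1, acc.2.1 ++ [k], acc.2.2)
      else (acc.1, acc.2.1, acc.2.2 ++ [k])) ([], [], [])
  PySem.List.sorted st.1 (fun x => x) false
    ++ PySem.List.sorted st.2.1 (fun x => x) false
    ++ PySem.List.sorted st.2.2 (fun x => x) false

-- ===== PORT B =====
-- helper `rank` of Source B
def pvRank (k : String) : Int :=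
  if PySem.Str.isIn "asus" k then 0
  else if PySem.Str.isIn "dgx" k then 1
  else 2

def rank_node_alt (hostnames : List String) : List String :=
  let ordered := PySem.List.sorted hostnames (fun x => x) false
  ([0, 1, 2] : List Int).flatMap (fun r => ordered.filter (fun k => pvRank k == r))

-- ===== PRECONDITION & SPEC =====
def Spec_rank_node (hostnames : List String) (out : List String) : Prop := out = rank_node_alt hostnames
instance (hostnames : List String) (out : List String) : Decidable (Spec_rank_node hostnames out) := by unfold Spec_rank_node; infer_instance

-- ===== CLAIM (what is proved, stated in full; the proofs are below) =====
def Claim_equal_rank_node : Prop := ∀ (hostnames : List String), Dom_rank_node hostnames → Spec_rank_node hostnames (rank_node hostnames)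

-- ===== LEMMAS AND PROOFS =====

-- A's partition loop produces the three filters of the input (with the accumulators in front);
-- stated for arbitrary tests p, q so the branch conditions stay opaque in the induction.
theorem pv_loop (p q : String → Bool) (xs : List String) (a b c : List String) :
    xs.foldl
      (fun (acc : List String × List String × List String) k =>
        if p k then (acc.1 ++ [k], acc.2.1, acc.2.2)
        else if q k then (acc.1, acc.2.1 ++ [k], acc.2.2)
        else (acc.1, acc.2.1, acc.2.2 ++ [k])) (a, b, c)
    = (a ++ xs.filter (fun k => p k),
       b ++ xs.filter (fun k => !p k && q k),
       c ++ xs.filter (fun k => !p k && !q k)) := by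
  induction xs generalizing a b c with
  | nil => simp
  | cons x t ih =>
    simp only [List.foldl_cons, List.filter_cons]
    by_cases h1 : p x
    · simp [h1, ih]
    · by_cases h2 : q x <;> simp [h1, h2, ih]

-- filtering commutes with sorting (identity key)
theorem pv_filter_sorted (p : String → Bool) (xs : List String) :
    (PySem.List.sorted xs (fun x => x) false).filter p
      = PySem.List.sorted (xs.filter p) (fun x => x) false := by
  refine (PySem.List.sorted_id_eq_of_perm_of_pairwise (κ := String) _ _ ?_ ?_).symm
  · exact (PySem.List.sorted_perm xs (fun x => x) false).filter p
  · exact List.Pairwise.sublist List.filter_sublist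
      (PySem.List.sorted_pairwise xs (fun x => x))

-- B's rank tests expressed through the original substring tests
theorem pv_rank0 (k : String) : (pvRank k == 0) = PySem.Str.isIn "asus" k := by
  unfold pvRank; split_ifs <;> simp_all
theorem pv_rank1 (k : String) :
    (pvRank k == 1) = (!PySem.Str.isIn "asus" k && PySem.Str.isIn "dgx" k) := by
  unfold pvRank; split_ifs <;> simp_all
theorem pv_rank2 (k : String) :
    (pvRank k == 2) = (!PySem.Str.isIn "asus" k && !PySem.Str.isIn "dgx" k) := by
  unfold pvRank; split_ifs <;> simp_all

-- ===== VERDICT (by name: the statement is the Claim_ definition above) =====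
theorem rank_node_spec : Claim_equal_rank_node := by
  intro hostnames _
  show rank_node hostnames = rank_node_alt hostnames
  unfold rank_node rank_node_alt
  rw [pv_loop]
  simp only [List.flatMap_cons, List.flatMap_nil, List.append_nil, List.nil_append]
  have e0 : (fun k => pvRank k == (0 : Int)) = (fun k => PySem.Str.isIn "asus" k) :=
    funext pv_rank0
  have e1 : (fun k => pvRank k == (1 : Int))
      = (fun k => !PySem.Str.isIn "asus" k && PySem.Str.isIn "dgx" k) := funext pv_rank1
  have e2 : (fun k => pvRank k == (2 : Int))
      = (fun k => !PySem.Str.isIn "asus" k && !PySem.Str.isIn "dgx" k) := funext pv_rank2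
  rw [e0, e1, e2, pv_filter_sorted, pv_filter_sorted, pv_filter_sorted, List.append_assoc]
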